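-- pv_equiv track=rewrite | github.com/amritanshu0980/AI-Invoice-01 | app0.py | smart_product_search
-- ===== SOURCE A (Python) =====
-- def smart_product_search(product_name, products):
--     product_name = product_name.lower().strip()
--     for product in products:
--         if product_name == product['name'].lower():
--             return product
--     for product in products:
--         if product_name in product['name'].lower():
--             return product
--     return None
-- ===== SOURCE B (Python) =====
-- def smart_product_search(product_name, products):
--     q = product_name.lower().strip()
--     fallback = None
--     for product in products:
--         name = product['name'].lower()
--         if q == name:
--             return product
--         if fallback is None and q in name:
--             fallback = product
--     return fallback
-- ===== Notes on version B (the rewrite author's own statement) =====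
-- stated objective: simpler
-- what changed: Replaces A's two sequential scans (exact pass, then substring pass that recomputes every lowercased name) with a single pass that returns an exact match immediately and keeps the first substring match as a fallback, lowercasing each name once.
import Mathlib
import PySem

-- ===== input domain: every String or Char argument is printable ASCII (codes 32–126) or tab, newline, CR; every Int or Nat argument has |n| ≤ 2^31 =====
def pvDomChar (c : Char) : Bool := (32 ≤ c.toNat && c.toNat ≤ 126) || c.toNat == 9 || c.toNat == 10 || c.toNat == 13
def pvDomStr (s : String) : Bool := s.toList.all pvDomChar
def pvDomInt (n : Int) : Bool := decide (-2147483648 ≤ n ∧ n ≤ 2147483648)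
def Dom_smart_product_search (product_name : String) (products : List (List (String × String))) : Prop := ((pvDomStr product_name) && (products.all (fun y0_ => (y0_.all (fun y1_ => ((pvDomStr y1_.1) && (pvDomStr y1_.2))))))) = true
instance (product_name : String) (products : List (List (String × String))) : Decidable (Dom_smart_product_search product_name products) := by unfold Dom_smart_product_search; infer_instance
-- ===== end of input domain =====

-- B: single pass with a fallback for the first substring match, lowercasing each name once,
-- instead of A's two sequential scans; proved equal to A on inputs where every product has a 'name' key.


-- ===== PORT A =====
-- first loop of A: return the first product whose lowercased name equals q
-- (a missing 'name' key is a KeyError in Python: outside Pre_, modelled as none)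
def pvFindExact (q : String) : List (List (String × String)) → Option (List (String × String))
  | [] => none
  | p :: rest =>
    match (PySem.Dict.mk p).get? "name" with
    | none => none
    | some n0 => if q == PySem.Str.lower n0 then some p else pvFindExact q rest

-- second loop of A: return the first product whose lowercased name contains q
def pvFindSub (q : String) : List (List (String × String)) → Option (List (String × String))
  | [] => none
  | p :: rest =>
    match (PySem.Dict.mk p).get? "name" with
    | none => none
    | some n0 => if PySem.Str.isIn q (PySem.Str.lower n0) then some p else pvFindSub q rest

def smart_product_search (product_name : String) (products : List (List (String × String))) : Option (List (String × String)) :=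
  let q := PySem.Str.strip (PySem.Str.lower product_name)
  match pvFindExact q products with
  | some p => some p
  | none => pvFindSub q products

-- ===== PORT B =====
-- single pass: return immediately on an exact match, remember the first substring match as fallback
def pvGoB (q : String) : List (List (String × String)) → Option (List (String × String)) → Option (List (String × String))
  | [], fallback => fallback
  | p :: rest, fallback =>
    match (PySem.Dict.mk p).get? "name" with
    | none => none
    | some n0 =>
      let n := PySem.Str.lower n0
      if q == n then some p
      else pvGoB q rest (if fallback.isNone && PySem.Str.isIn q n then some p else fallback)

def smart_product_search_alt (product_name : String) (products : List (List (String × String))) : Option (List (String × String)) :=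
  pvGoB (PySem.Str.strip (PySem.Str.lower product_name)) products none

-- ===== PRECONDITION & SPEC =====
def pvHasName (p : List (String × String)) : Bool := ((PySem.Dict.mk p).get? "name").isSome
def pvExactMatch (q : String) (p : List (String × String)) : Bool :=
  match (PySem.Dict.mk p).get? "name" with
  | some n0 => q == PySem.Str.lower n0
  | none => false
-- Pre_ excludes exactly the inputs on which Python A raises KeyError: some product lacks a
-- 'name' key and no exact match occurs strictly before the first such product.
def pvPreList (q : String) (ps : List (List (String × String))) : Prop :=
  (∀ p ∈ ps, pvHasName p = true) ∨
  (∃ i < ps.length, pvExactMatch q (ps.getD i []) = true ∧ ∀ j < i, pvHasName (ps.getD j []) = true)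
def Pre_smart_product_search (product_name : String) (products : List (List (String × String))) : Prop :=
  pvPreList (PySem.Str.strip (PySem.Str.lower product_name)) products
instance (product_name : String) (products : List (List (String × String))) : Decidable (Pre_smart_product_search product_name products) := by unfold Pre_smart_product_search pvPreList; infer_instance
def pvWitness_smart_product_search : String × (List (List (String × String))) :=
  ("Laptop", [[("name", "Gaming Laptop"), ("price", "999")], [("name", "Mouse")]])

def Spec_smart_product_search (product_name : String) (products : List (List (String × String))) (out : Option (List (String × String))) : Prop := out = smart_product_search_alt product_name products
instance (product_name : String) (products : List (List (String × String))) (out : Option (List (String × String))) : Decidable (Spec_smart_product_search product_name products out) := by unfold Spec_smart_product_search; infer_instance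

-- ===== CLAIM (what is proved, stated in full; the proofs are below) =====
def Claim_equal_smart_product_search : Prop := ∀ (product_name : String) (products : List (List (String × String))), Dom_smart_product_search product_name products → Pre_smart_product_search product_name products → Spec_smart_product_search product_name products (smart_product_search product_name products)

-- ===== LEMMAS AND PROOFS =====
-- B's single pass equals A's two scans, for any pending fallback, wherever A terminates normally
theorem pvGoB_eq (q : String) (ps : List (List (String × String)))
    (h : pvPreList q ps) (fb : Option (List (String × String))) :
    pvGoB q ps fb =
      match pvFindExact q ps with
      | some r => some r
      | none => match fb with
                | some x => some x
                | none => pvFindSub q ps := by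
  induction ps generalizing fb with
  | nil => cases fb <;> simp [pvGoB, pvFindExact, pvFindSub]
  | cons p rest ih =>
    have hp : pvHasName p = true := by
      rcases h with h1 | ⟨i, hi, hex, hpre⟩
      · exact h1 p (by simp)
      · cases i with
        | zero =>
          rw [List.getD_cons_zero] at hex
          unfold pvExactMatch at hex
          unfold pvHasName
          cases hg : (PySem.Dict.mk p).get? "name" with
          | none => rw [hg] at hex; simp at hex
          | some _ => simp
        | succ k => simpa using hpre 0 (Nat.succ_pos k)
    obtain ⟨n0, hn0⟩ := Option.isSome_iff_exists.mp hp
    by_cases hq : (q == PySem.Str.lower n0) = true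
    · simp [pvGoB, pvFindExact, hn0, hq]
    · have hrest : pvPreList q rest := by
        rcases h with h1 | ⟨i, hi, hex, hpre⟩
        · exact Or.inl (fun x hx => h1 x (List.mem_cons_of_mem _ hx))
        · cases i with
          | zero =>
            exfalso
            rw [List.getD_cons_zero] at hex
            unfold pvExactMatch at hex
            rw [hn0] at hex
            exact hq hex
          | succ k =>
            refine Or.inr ⟨k, by simpa using hi, by simpa using hex, fun j hj => ?_⟩
            simpa using hpre (j + 1) (by omega)
      simp only [pvGoB, pvFindExact, pvFindSub, hn0]
      simp only [hq]
      rw [ih hrest]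
      cases fb with
      | some x => simp
      | none =>
        cases hin : PySem.Chars.isIn q.toList (PySem.Chars.lower n0.toList) with
        | true => simp [hin]
        | false => simp [hin]

-- ===== VERDICT (by name: the statement is the Claim_ definition above) =====
theorem smart_product_search_spec : Claim_equal_smart_product_search := by
  intro product_name products _ hpre
  unfold Spec_smart_product_search smart_product_search smart_product_search_alt
  rw [pvGoB_eq _ _ hpre]
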